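-- pv_equiv track=rewrite | github.com/glaucioscheibel/nosqltrajectory | src/main/python/04 - Arquivos Antigos/Projeto desenvolvido Tkinter/projeto_trajetorias/trajetorias/trajetorias.py | combina_pontos_de_dois_em_dois
-- ===== SOURCE A (Python) =====
-- def combina_pontos_de_dois_em_dois(pontos):
--     combinacao = []
--     x = 0
--     try:
--         for ponto in pontos:
--             combinacao.append((pontos[x][0],pontos[x][1],pontos[x+1][0],pontos[x+1][1]))
--             x += 1
--     except: return combinacao
-- ===== SOURCE B (Python) =====
-- def combina_pontos_de_dois_em_dois(pontos):
--     # build the output back-to-front: walk the points right-to-left, pairing each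
--     # point with its successor (the previously visited point), then reverse
--     out = []
--     nxt = None
--     for p in reversed(pontos):
--         if nxt is not None:
--             out.append((p[0], p[1], nxt[0], nxt[1]))
--         nxt = p
--     out.reverse()
--     return out
-- ===== Notes on version B (the rewrite author's own statement) =====
-- stated objective: alternative
-- what changed: Replaced the forward index-counter loop whose termination relies on a bare except swallowing the final IndexError by a reverse traversal that builds the output back-to-front, pairing each point with the successor remembered from the previous iteration, then reversing once at the end; no indexing and no exception handling.
-- outside the precondition, e.g. on combina_pontos_de_dois_em_dois([]): A returns None, B returns []
import Mathlib
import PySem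

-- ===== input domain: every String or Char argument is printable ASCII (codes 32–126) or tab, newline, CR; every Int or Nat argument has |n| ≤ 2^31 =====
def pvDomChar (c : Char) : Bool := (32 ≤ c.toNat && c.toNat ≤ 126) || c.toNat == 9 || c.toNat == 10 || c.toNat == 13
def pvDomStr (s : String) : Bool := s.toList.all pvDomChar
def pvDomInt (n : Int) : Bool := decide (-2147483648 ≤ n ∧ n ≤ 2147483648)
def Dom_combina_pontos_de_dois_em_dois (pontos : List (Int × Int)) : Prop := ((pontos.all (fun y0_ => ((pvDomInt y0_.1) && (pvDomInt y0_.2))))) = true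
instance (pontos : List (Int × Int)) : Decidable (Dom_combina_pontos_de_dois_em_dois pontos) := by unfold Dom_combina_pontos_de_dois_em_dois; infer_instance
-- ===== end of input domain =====

-- B replaces A's forward index-counter loop terminated by a bare except (swallowing the
-- final IndexError) with a reverse traversal building the output back-to-front, carrying
-- the successor point and reversing once at the end; objective: alternative decomposition.

-- ===== PORT A =====
-- the 'for ponto in pontos' loop with index x and accumulator; the bare 'except'
-- (triggered by pontos[x+1] on the last iteration) returns the accumulator.
def pvGoA (pl : List (Int × Int)) : List (Int × Int) → Nat → List (Int × Int × Int × Int) → List (Int × Int × Int × Int)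
  | [], _, acc => acc     -- loop finished with no exception (only on empty input; Python returns None there, excluded by Pre_)
  | _ :: rest, x, acc =>
    match PySem.List.pyGet? pl (x : Int), PySem.List.pyGet? pl ((x : Int) + 1) with
    | some p, some q => pvGoA pl rest (x + 1) (acc ++ [(p.1, p.2, q.1, q.2)])
    | _, _ => acc         -- IndexError caught by the bare except: return combinacao

def combina_pontos_de_dois_em_dois (pontos : List (Int × Int)) : List (Int × Int × Int × Int) :=
  pvGoA pontos pontos 0 []

-- ===== PORT B =====
-- Source B's reverse traversal: walk reversed(pontos) carrying nxt (the successor),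
-- appending one quadruple per step, then reverse the built list at the end.
def pvGoB : List (Int × Int) → Option (Int × Int) → List (Int × Int × Int × Int) → List (Int × Int × Int × Int)
  | [], _, out => out
  | p :: rest, nxt, out =>
    pvGoB rest (some p) (match nxt with
      | some q => out ++ [(p.1, p.2, q.1, q.2)]
      | none => out)

def combina_pontos_de_dois_em_dois_alt (pontos : List (Int × Int)) : List (Int × Int × Int × Int) :=
  (pvGoB pontos.reverse none []).reverse

-- ===== PRECONDITION & SPEC =====
-- Pre_ excludes the empty list, on which A falls off the end of the function and
-- returns None (not a value of the declared list type); B returns [] there.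
def Pre_combina_pontos_de_dois_em_dois (pontos : List (Int × Int)) : Prop := pontos ≠ []
instance (pontos : List (Int × Int)) : Decidable (Pre_combina_pontos_de_dois_em_dois pontos) := by unfold Pre_combina_pontos_de_dois_em_dois; infer_instance
def pvWitness_combina_pontos_de_dois_em_dois : (List (Int × Int)) := [(1, 2), (3, 4)]

def Spec_combina_pontos_de_dois_em_dois (pontos : List (Int × Int)) (out : List (Int × Int × Int × Int)) : Prop := out = combina_pontos_de_dois_em_dois_alt pontos
instance (pontos : List (Int × Int)) (out : List (Int × Int × Int × Int)) : Decidable (Spec_combina_pontos_de_dois_em_dois pontos out) := by unfold Spec_combina_pontos_de_dois_em_dois; infer_instance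

-- ===== CLAIM (what is proved, stated in full; the proofs are below) =====
def Claim_equal_combina_pontos_de_dois_em_dois : Prop := ∀ (pontos : List (Int × Int)), Dom_combina_pontos_de_dois_em_dois pontos → Pre_combina_pontos_de_dois_em_dois pontos → Spec_combina_pontos_de_dois_em_dois pontos (combina_pontos_de_dois_em_dois pontos)

-- ===== LEMMAS AND PROOFS =====

theorem pvGoA_invariant (l : List (Int × Int)) : ∀ (pref : List (Int × Int)) (acc : List (Int × Int × Int × Int)),
    pvGoA (pref ++ l) l pref.length acc
      = acc ++ (List.zip l l.tail).map (fun ab => (ab.1.1, ab.1.2, ab.2.1, ab.2.2)) := by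
  induction l with
  | nil => intro pref acc; simp [pvGoA]
  | cons a rest ih =>
    intro pref acc
    cases rest with
    | nil =>
      have h1 : PySem.List.pyGet? (pref ++ [a]) ((pref.length : Int) + 1) = none := by
        rw [show ((pref.length : Int) + 1) = ((pref.length + 1 : Nat) : Int) by push_cast; ring,
          PySem.List.pyGet?_natCast]
        simp
      simp [pvGoA, h1]
    | cons b rest' =>
      have h1 : PySem.List.pyGet? (pref ++ a :: b :: rest') (pref.length : Int) = some a :=
        PySem.List.pyGet?_append_length pref _ a
      have h2 : PySem.List.pyGet? (pref ++ a :: b :: rest') ((pref.length : Int) + 1) = some b := by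
        have := PySem.List.pyGet?_append_length (pref ++ [a]) rest' b
        simpa [List.append_assoc, Int.add_comm] using this
      have ih' := ih (pref ++ [a]) (acc ++ [(a.1, a.2, b.1, b.2)])
      simp only [List.append_assoc, List.singleton_append, List.length_append, List.length_cons,
        List.length_nil, Nat.zero_add] at ih'
      simp only [pvGoA, h1, h2]
      simp only [pvGoA] at ih'
      rw [ih']
      simp [List.zip]

theorem pvGoB_acc (l : List (Int × Int)) : ∀ (nxt : Option (Int × Int)) (out : List (Int × Int × Int × Int)),
    pvGoB l nxt out = out ++ pvGoB l nxt [] := by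
  induction l with
  | nil => intro nxt out; simp [pvGoB]
  | cons p rest ih =>
    intro nxt out
    cases nxt with
    | none =>
      simp only [pvGoB, List.nil_append]
      exact ih (some p) out
    | some q =>
      simp only [pvGoB, List.nil_append]
      rw [ih (some p) (out ++ [(p.1, p.2, q.1, q.2)]), ih (some p) [(p.1, p.2, q.1, q.2)]]
      simp

theorem zipmap_append_pair (ys : List (Int × Int)) (a b : Int × Int) :
    (List.zip (ys ++ [a, b]) (ys ++ [a, b]).tail).map (fun ab => (ab.1.1, ab.1.2, ab.2.1, ab.2.2))
      = (List.zip (ys ++ [a]) (ys ++ [a]).tail).map (fun ab => (ab.1.1, ab.1.2, ab.2.1, ab.2.2))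
          ++ [(a.1, a.2, b.1, b.2)] := by
  induction ys with
  | nil => simp [List.zip]
  | cons c ys' ih =>
    cases ys' with
    | nil => simp [List.zip]
    | cons e ys'' =>
      simp only [List.cons_append, List.tail_cons, List.zip_cons_cons, List.map_cons] at *
      rw [ih]

theorem pvGoB_some (l : List (Int × Int)) : ∀ (q : Int × Int),
    pvGoB l (some q) []
      = ((List.zip (q :: l).reverse (q :: l).reverse.tail).map
          (fun ab => (ab.1.1, ab.1.2, ab.2.1, ab.2.2))).reverse := by
  induction l with
  | nil => intro q; simp [pvGoB]
  | cons p rest ih =>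
    intro q
    simp only [pvGoB]
    rw [pvGoB_acc rest (some p), ih p]
    have h : (q :: p :: rest).reverse = rest.reverse ++ [p, q] := by simp
    have h2 : (p :: rest).reverse = rest.reverse ++ [p] := by simp
    rw [h, h2, zipmap_append_pair]
    simp

theorem alt_eq_zip (pontos : List (Int × Int)) :
    combina_pontos_de_dois_em_dois_alt pontos
      = (List.zip pontos pontos.tail).map (fun ab => (ab.1.1, ab.1.2, ab.2.1, ab.2.2)) := by
  unfold combina_pontos_de_dois_em_dois_alt
  induction pontos using List.reverseRecOn with
  | nil => simp [pvGoB]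
  | append_singleton ys z _ =>
    rw [show (ys ++ [z]).reverse = z :: ys.reverse by simp]
    simp only [pvGoB]
    rw [pvGoB_some ys.reverse z]
    simp

-- ===== VERDICT (by name: the statement is the Claim_ definition above) =====
theorem combina_pontos_de_dois_em_dois_spec : Claim_equal_combina_pontos_de_dois_em_dois := by
  intro pontos _ _
  unfold Spec_combina_pontos_de_dois_em_dois combina_pontos_de_dois_em_dois
  rw [alt_eq_zip]
  have := pvGoA_invariant pontos [] []
  simpa using this
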